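-- pv_equiv track=rewrite | github.com/yzGuu830/efficient-speech-codec | Deep-Audio-Signal-Coding/src/scripts/progressive_trainer.py | compute_full_cutoffs
-- ===== SOURCE A (Python) =====
-- def compute_full_cutoffs(warmup_steps: int=15000,
--                          progressive_steps: list=[25000,25000,25000,25000,25000],
--                          stabilize_steps: list=[15000,15000,15000,15000,15000],
--                          dropout_steps: int=35000):
--
--     maintain_step = warmup_steps
--     progressive_cutoffs = {"stabilize_step_0": 0, "progressive_step_1": maintain_step}
--     for i, prog_step in enumerate(progressive_steps):
--         maintain_step += prog_step
--         progressive_cutoffs[f"stabilize_step_{i+1}"] = maintain_step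
--         maintain_step += stabilize_steps[i]
--         if i < len(progressive_steps)-1:
--             progressive_cutoffs[f"progressive_step_{i+2}"] = maintain_step
--         else:
--             progressive_cutoffs["dropout_step"] = maintain_step
--
--     total_training_steps = maintain_step + dropout_steps
--     return list(progressive_cutoffs.keys()), list(progressive_cutoffs.values()), total_training_steps
-- ===== SOURCE B (Python) =====
-- def compute_full_cutoffs(warmup_steps: int=15000,
--                          progressive_steps: list=[25000,25000,25000,25000,25000],
--                          stabilize_steps: list=[15000,15000,15000,15000,15000],
--                          dropout_steps: int=35000):
--     # Build the ordered (key, increment) schedule first, then take one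
--     # cumulative-sum pass to turn increments into cutoffs.
--     n = len(progressive_steps)
--     entries = [("stabilize_step_0", 0), ("progressive_step_1", warmup_steps)]
--     for i, (p, s) in enumerate(zip(progressive_steps, stabilize_steps)):
--         entries.append((f"stabilize_step_{i+1}", p))
--         entries.append(("dropout_step" if i == n - 1 else f"progressive_step_{i+2}", s))
--     keys = [k for k, _ in entries]
--     values = []
--     acc = 0
--     for _, inc in entries:
--         acc += inc
--         values.append(acc)
--     return keys, values, values[-1] + dropout_steps
-- ===== Notes on version B (the rewrite author's own statement) =====
-- stated objective: alternative
-- what changed: Instead of mutating a dict while threading a running maintain_step counter, B first builds the ordered (key, increment) schedule as a flat list and then converts increments to cutoffs in a single cumulative-sum pass; the total is the last cumulative value plus dropout_steps.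
import Mathlib
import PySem

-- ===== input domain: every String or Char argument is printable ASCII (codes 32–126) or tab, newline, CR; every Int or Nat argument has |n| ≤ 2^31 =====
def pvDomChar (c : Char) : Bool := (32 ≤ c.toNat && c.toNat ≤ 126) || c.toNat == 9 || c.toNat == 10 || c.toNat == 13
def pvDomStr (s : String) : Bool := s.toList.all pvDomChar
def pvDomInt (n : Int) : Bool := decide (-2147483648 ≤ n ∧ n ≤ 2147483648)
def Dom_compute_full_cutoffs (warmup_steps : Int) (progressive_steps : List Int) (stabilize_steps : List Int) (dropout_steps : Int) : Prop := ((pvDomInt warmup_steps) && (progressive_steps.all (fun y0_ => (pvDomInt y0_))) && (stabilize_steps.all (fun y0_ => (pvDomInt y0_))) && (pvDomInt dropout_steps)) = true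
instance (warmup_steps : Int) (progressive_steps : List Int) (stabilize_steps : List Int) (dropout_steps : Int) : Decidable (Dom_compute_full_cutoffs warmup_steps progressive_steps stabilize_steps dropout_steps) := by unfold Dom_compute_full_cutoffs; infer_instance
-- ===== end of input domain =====

-- B replaces A's dict mutation + running counter by an ordered (key, increment)
-- schedule followed by one cumulative-sum pass (objective: alternative decomposition).

-- ===== PORT A =====
def compute_full_cutoffs (warmup_steps : Int) (progressive_steps : List Int) (stabilize_steps : List Int) (dropout_steps : Int) : List String × List Int × Int :=
  let final := (PySem.List.enumerate progressive_steps).foldl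
    (fun (st : Int × PySem.Dict String Int) ip =>
      let maintain_step := st.1 + ip.2
      let d := st.2.insert ("stabilize_step_" ++ PySem.Int.toStr (ip.1 + 1)) maintain_step
      let maintain_step2 := maintain_step + (PySem.List.pyGet? stabilize_steps ip.1).getD 0
      let d2 := if ip.1 < PySem.List.len progressive_steps - 1 then
          d.insert ("progressive_step_" ++ PySem.Int.toStr (ip.1 + 2)) maintain_step2
        else
          d.insert "dropout_step" maintain_step2
      (maintain_step2, d2))
    (warmup_steps, PySem.Dict.ofList [("stabilize_step_0", (0 : Int)), ("progressive_step_1", warmup_steps)])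
  (final.2.keys, final.2.values, final.1 + dropout_steps)

-- ===== PORT B =====
def compute_full_cutoffs_alt (warmup_steps : Int) (progressive_steps : List Int) (stabilize_steps : List Int) (dropout_steps : Int) : List String × List Int × Int :=
  let n := PySem.List.len progressive_steps
  let entries := (PySem.List.enumerate (progressive_steps.zip stabilize_steps)).foldl
    (fun (es : List (String × Int)) ix =>
      (es ++ [("stabilize_step_" ++ PySem.Int.toStr (ix.1 + 1), ix.2.1)]) ++
        [((if ix.1 == n - 1 then "dropout_step" else "progressive_step_" ++ PySem.Int.toStr (ix.1 + 2)), ix.2.2)])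
    [("stabilize_step_0", (0 : Int)), ("progressive_step_1", warmup_steps)]
  let keys := entries.map (·.1)
  let acc := entries.foldl
    (fun (st : List Int × Int) e =>
      let a := st.2 + e.2
      (st.1 ++ [a], a)) ([], 0)
  (keys, acc.1, (PySem.List.pyGet? acc.1 (-1)).getD 0 + dropout_steps)

-- ===== PRECONDITION & SPEC =====
-- A indexes stabilize_steps[i] for every i below len(progressive_steps) and raises
-- IndexError when stabilize_steps is shorter; Pre_ excludes exactly those inputs.
def Pre_compute_full_cutoffs (warmup_steps : Int) (progressive_steps : List Int) (stabilize_steps : List Int) (dropout_steps : Int) : Prop :=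
  progressive_steps.length ≤ stabilize_steps.length
instance (warmup_steps : Int) (progressive_steps : List Int) (stabilize_steps : List Int) (dropout_steps : Int) : Decidable (Pre_compute_full_cutoffs warmup_steps progressive_steps stabilize_steps dropout_steps) := by unfold Pre_compute_full_cutoffs; infer_instance

def pvWitness_compute_full_cutoffs : Int × List Int × List Int × Int := (15000, [25000, 25000], [15000, 15000], 35000)

def Spec_compute_full_cutoffs (warmup_steps : Int) (progressive_steps : List Int) (stabilize_steps : List Int) (dropout_steps : Int) (out : List String × List Int × Int) : Prop := out = compute_full_cutoffs_alt warmup_steps progressive_steps stabilize_steps dropout_steps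
instance (warmup_steps : Int) (progressive_steps : List Int) (stabilize_steps : List Int) (dropout_steps : Int) (out : List String × List Int × Int) : Decidable (Spec_compute_full_cutoffs warmup_steps progressive_steps stabilize_steps dropout_steps out) := by unfold Spec_compute_full_cutoffs; infer_instance

-- ===== CLAIM (what is proved, stated in full; the proofs are below) =====
def Claim_equal_compute_full_cutoffs : Prop := ∀ (warmup_steps : Int) (progressive_steps : List Int) (stabilize_steps : List Int) (dropout_steps : Int), Dom_compute_full_cutoffs warmup_steps progressive_steps stabilize_steps dropout_steps → Pre_compute_full_cutoffs warmup_steps progressive_steps stabilize_steps dropout_steps → Spec_compute_full_cutoffs warmup_steps progressive_steps stabilize_steps dropout_steps (compute_full_cutoffs warmup_steps progressive_steps stabilize_steps dropout_steps)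

-- ===== LEMMAS AND PROOFS =====

-- decimal decoding, to prove str(n) injective on nonnegative ints
def pvDec (cs : List Char) : Nat := cs.foldl (fun a c => 10 * a + (c.toNat - 48)) 0

lemma pvDec_append_singleton (l : List Char) (c : Char) :
    pvDec (l ++ [c]) = 10 * pvDec l + (c.toNat - 48) := by
  simp [pvDec, List.foldl_append]

lemma pv_digitChar_val (m : Nat) (h : m < 10) : (Nat.digitChar m).toNat - 48 = m := by
  interval_cases m <;> rfl

lemma pv_toDigitsCore_append (f n : Nat) (l : List Char) :
    Nat.toDigitsCore 10 f n l = Nat.toDigitsCore 10 f n [] ++ l := by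
  induction f generalizing n l with
  | zero => simp [Nat.toDigitsCore]
  | succ f ih =>
    simp only [Nat.toDigitsCore]
    by_cases h : n / 10 = 0
    · simp [h]
    · simp only [h, if_neg h]
      rw [ih (n / 10) (Nat.digitChar (n % 10) :: l), ih (n / 10) [Nat.digitChar (n % 10)]]
      simp

lemma pv_dec_toDigitsCore (f n : Nat) (h : n < f) :
    pvDec (Nat.toDigitsCore 10 f n []) = n := by
  induction f generalizing n with
  | zero => omega
  | succ f ih =>
    simp only [Nat.toDigitsCore]
    by_cases h0 : n / 10 = 0
    · have hn : n < 10 := by omega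
      simp [h0, pvDec, Nat.mod_eq_of_lt hn, pv_digitChar_val n hn]
    · simp only [h0, if_false, eq_self_iff_true, if_neg]
      rw [pv_toDigitsCore_append, pvDec_append_singleton,
        ih (n / 10) (by have := Nat.div_lt_self (by omega : 0 < n) (by norm_num : 1 < 10); omega),
        pv_digitChar_val _ (Nat.mod_lt _ (by norm_num))]
      omega

lemma pv_toDigits_inj (m n : Nat) (h : Nat.toDigits 10 m = Nat.toDigits 10 n) : m = n := by
  have hm := pv_dec_toDigitsCore (m + 1) m (by omega)
  have hn := pv_dec_toDigitsCore (n + 1) n (by omega)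
  unfold Nat.toDigits at h
  rw [h] at hm
  rw [hm] at hn
  omega

lemma pv_toChars_nonneg (a : Int) (ha : 0 ≤ a) : PySem.Int.toChars a = Nat.toDigits 10 a.toNat := by
  simp [PySem.Int.toChars, not_lt.mpr ha, Int.not_lt.mpr ha]

lemma pv_toStr_inj (a b : Int) (ha : 0 ≤ a) (hb : 0 ≤ b)
    (h : PySem.Int.toStr a = PySem.Int.toStr b) : a = b := by
  have h1 : PySem.Int.toChars a = PySem.Int.toChars b := by
    rw [← PySem.Int.toList_toStr, ← PySem.Int.toList_toStr, h]
  rw [pv_toChars_nonneg a ha, pv_toChars_nonneg b hb] at h1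
  have := pv_toDigits_inj _ _ h1
  omega

-- the three key shapes
def skey (m : Int) : String := "stabilize_step_" ++ PySem.Int.toStr m
def pkey (m : Int) : String := "progressive_step_" ++ PySem.Int.toStr m

lemma skey_inj (a b : Int) (ha : 0 ≤ a) (hb : 0 ≤ b) (h : a ≠ b) : skey a ≠ skey b := by
  intro he
  exact h (pv_toStr_inj a b ha hb (by
    have := congrArg String.toList he
    simp only [skey, String.toList_append] at this
    have h2 : (PySem.Int.toStr a).toList = (PySem.Int.toStr b).toList := by
      exact List.append_cancel_left this
    exact String.toList_injective h2))

lemma pkey_inj (a b : Int) (ha : 0 ≤ a) (hb : 0 ≤ b) (h : a ≠ b) : pkey a ≠ pkey b := by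
  intro he
  exact h (pv_toStr_inj a b ha hb (by
    have := congrArg String.toList he
    simp only [pkey, String.toList_append] at this
    have h2 : (PySem.Int.toStr a).toList = (PySem.Int.toStr b).toList := by
      exact List.append_cancel_left this
    exact String.toList_injective h2))

lemma skey_ne_pkey (a b : Int) : skey a ≠ pkey b := by
  intro he
  have := congrArg String.toList he
  simp [skey, pkey, String.toList_append] at this

lemma skey_ne_drop (a : Int) : skey a ≠ "dropout_step" := by
  intro he
  have := congrArg String.toList he
  simp [skey, String.toList_append] at this

lemma pkey_ne_drop (a : Int) : pkey a ≠ "dropout_step" := by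
  intro he
  have := congrArg String.toList he
  simp [pkey, String.toList_append] at this

-- (key, increment) schedule over the zipped (progressive, stabilize) list
def ents (k : Nat) : List (Int × Int) → List (String × Int)
  | [] => []
  | (p, s) :: rest =>
      (skey ((k : Int) + 1), p) ::
        ((if rest.isEmpty then "dropout_step" else pkey ((k : Int) + 2)), s) :: ents (k + 1) rest

-- cumulative values of a schedule, and the final cumulative value
def cum (a : Int) : List (String × Int) → List (String × Int)
  | [] => []
  | (key, inc) :: rest => (key, a + inc) :: cum (a + inc) rest

def cumFin (a : Int) : List (String × Int) → Int
  | [] => a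
  | (_, inc) :: rest => cumFin (a + inc) rest

lemma map_fst_cum (a : Int) (l : List (String × Int)) : (cum a l).map (·.1) = l.map (·.1) := by
  induction l generalizing a with
  | nil => rfl
  | cons e rest ih => cases e; simp [cum, ih]

lemma cum_append (a : Int) (l1 l2 : List (String × Int)) :
    cum a (l1 ++ l2) = cum a l1 ++ cum (cumFin a l1) l2 := by
  induction l1 generalizing a with
  | nil => simp [cum, cumFin]
  | cons e rest ih => cases e; simp [cum, cumFin, ih]

lemma getLast?_map_snd_cum (a : Int) (l : List (String × Int)) (h : l ≠ []) :
    ((cum a l).map (·.2)).getLast? = some (cumFin a l) := by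
  induction l generalizing a with
  | nil => simp at h
  | cons e rest ih =>
    cases e with
    | mk key inc =>
      cases rest with
      | nil => simp [cum, cumFin]
      | cons e2 r2 =>
        have := ih (a + inc) (by simp)
        simpa [cum, cumFin, List.getLast?_cons] using this

-- freshness invariant for A's dict
def Fresh (k : Nat) (d : PySem.Dict String Int) : Prop :=
  "dropout_step" ∉ d.keys ∧
    ∀ j : Int, (k : Int) < j → skey j ∉ d.keys ∧ pkey (j + 1) ∉ d.keys

lemma pv_contains_false {d : PySem.Dict String Int} {x : String} (h : x ∉ d.keys) :
    d.contains x = false := by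
  cases hc : d.contains x
  · rfl
  · exact absurd ((PySem.Dict.contains_iff_mem_keys d x).mp hc) h

-- A's fold over a suffix of progressive_steps appends the cumulated schedule
lemma foldA (ps ss : List Int) (hss : ps.length ≤ ss.length) :
    ∀ (tail : List Int) (k : Nat) (m : Int) (d : PySem.Dict String Int),
      k + tail.length = ps.length → Fresh k d →
      ((PySem.List.enumerate tail (k : Int)).foldl
        (fun (st : Int × PySem.Dict String Int) ip =>
          let maintain_step := st.1 + ip.2
          let d' := st.2.insert ("stabilize_step_" ++ PySem.Int.toStr (ip.1 + 1)) maintain_step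
          let maintain_step2 := maintain_step + (PySem.List.pyGet? ss ip.1).getD 0
          let d2 := if ip.1 < PySem.List.len ps - 1 then
              d'.insert ("progressive_step_" ++ PySem.Int.toStr (ip.1 + 2)) maintain_step2
            else
              d'.insert "dropout_step" maintain_step2
          (maintain_step2, d2)) (m, d)).2.items
        = d.items ++ cum m (ents k (tail.zip (ss.drop k))) ∧
      ((PySem.List.enumerate tail (k : Int)).foldl
        (fun (st : Int × PySem.Dict String Int) ip =>
          let maintain_step := st.1 + ip.2
          let d' := st.2.insert ("stabilize_step_" ++ PySem.Int.toStr (ip.1 + 1)) maintain_step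
          let maintain_step2 := maintain_step + (PySem.List.pyGet? ss ip.1).getD 0
          let d2 := if ip.1 < PySem.List.len ps - 1 then
              d'.insert ("progressive_step_" ++ PySem.Int.toStr (ip.1 + 2)) maintain_step2
            else
              d'.insert "dropout_step" maintain_step2
          (maintain_step2, d2)) (m, d)).1
        = cumFin m (ents k (tail.zip (ss.drop k))) := by
  intro tail
  induction tail with
  | nil =>
    intro k m d hk hf
    simp [PySem.List.enumerate_nil, ents, cum, cumFin]
  | cons p rest ih =>
    intro k m d hk hf
    have hkn : k < ps.length := by simp only [List.length_cons] at hk; omega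
    have hks : k < ss.length := lt_of_lt_of_le hkn hss
    rw [PySem.List.enumerate_cons]
    simp only [List.foldl_cons]
    have hget : (PySem.List.pyGet? ss (k : Int)).getD 0 = ss[k] := by
      rw [PySem.List.pyGet?_natCast]
      simp [List.getElem?_eq_getElem hks]
    have hdrop : ss.drop k = ss[k] :: ss.drop (k + 1) := (List.getElem_cons_drop hks).symm
    -- freshness of the two keys inserted at index k
    have hs1 : skey ((k : Int) + 1) ∉ d.keys := (hf.2 ((k : Int) + 1) (by omega)).1
    have hp2 : pkey ((k : Int) + 2) ∉ d.keys := by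
      have := (hf.2 ((k : Int) + 1) (by omega)).2
      simpa [show (k : Int) + 1 + 1 = (k : Int) + 2 by ring] using this
    have hdr : "dropout_step" ∉ d.keys := hf.1
    have hc1 : d.contains ("stabilize_step_" ++ PySem.Int.toStr ((k : Int) + 1)) = false :=
      pv_contains_false hs1
    have hmem1 : ∀ x, x ∈ (d.insert ("stabilize_step_" ++ PySem.Int.toStr ((k : Int) + 1)) (m + p)).keys ↔
        x = skey ((k : Int) + 1) ∨ x ∈ d.keys := by
      intro x; simp [PySem.Dict.mem_keys_insert, skey]
    cases rest with
    | nil =>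
      -- last iteration: the branch inserts "dropout_step"
      have hcond : ¬ ((k : Int) < PySem.List.len ps - 1) := by
        simp only [List.length_cons, List.length_nil] at hk
        simp only [PySem.List.len_eq]; omega
      rw [hget, if_neg hcond]
      have hc2 : (d.insert ("stabilize_step_" ++ PySem.Int.toStr ((k : Int) + 1)) (m + p)).contains
          "dropout_step" = false := by
        apply pv_contains_false
        rw [hmem1]
        rintro (h | h)
        · exact skey_ne_drop _ h.symm
        · exact hdr h
      constructor
      · simp only [PySem.List.enumerate_nil, List.foldl_nil]
        rw [PySem.Dict.items_insert_of_not_contains _ _ hc2,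
          PySem.Dict.items_insert_of_not_contains _ _ hc1]
        rw [hdrop]
        simp only [List.zip_cons_cons, List.zip_nil_left, List.isEmpty_nil, ents, cum, if_true]
        simp [skey]
      · simp only [PySem.List.enumerate_nil, List.foldl_nil]
        rw [hdrop]
        simp only [List.zip_cons_cons, List.zip_nil_left, List.isEmpty_nil, ents, cumFin, if_true]
    | cons q rs =>
      -- not the last iteration: the branch inserts the next progressive key
      have hcond : (k : Int) < PySem.List.len ps - 1 := by
        simp only [List.length_cons] at hk
        simp only [PySem.List.len_eq]; push_cast; omega
      rw [hget, if_pos hcond]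
      have hk1s : k + 1 < ss.length := by
        simp only [List.length_cons] at hk
        omega
      have hc2 : (d.insert ("stabilize_step_" ++ PySem.Int.toStr ((k : Int) + 1)) (m + p)).contains
          ("progressive_step_" ++ PySem.Int.toStr ((k : Int) + 2)) = false := by
        apply pv_contains_false
        rw [hmem1]
        rintro (h | h)
        · exact skey_ne_pkey _ _ h.symm
        · exact hp2 h
      have hitems2 : ((d.insert ("stabilize_step_" ++ PySem.Int.toStr ((k : Int) + 1)) (m + p)).insert
            ("progressive_step_" ++ PySem.Int.toStr ((k : Int) + 2)) (m + p + ss[k])).items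
          = d.items ++ [(skey ((k : Int) + 1), m + p), (pkey ((k : Int) + 2), m + p + ss[k])] := by
        rw [PySem.Dict.items_insert_of_not_contains _ _ hc2,
          PySem.Dict.items_insert_of_not_contains _ _ hc1]
        simp [skey, pkey]
      have hmem2 : ∀ x, x ∈ ((d.insert ("stabilize_step_" ++ PySem.Int.toStr ((k : Int) + 1)) (m + p)).insert
            ("progressive_step_" ++ PySem.Int.toStr ((k : Int) + 2)) (m + p + ss[k])).keys ↔
          x = pkey ((k : Int) + 2) ∨ x = skey ((k : Int) + 1) ∨ x ∈ d.keys := by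
        intro x
        rw [PySem.Dict.mem_keys_insert]
        constructor
        · rintro (h | h)
          · exact Or.inl h
          · exact Or.inr ((hmem1 x).mp h)
        · rintro (h | h)
          · exact Or.inl h
          · exact Or.inr ((hmem1 x).mpr h)
      have hfresh2 : Fresh (k + 1) ((d.insert ("stabilize_step_" ++ PySem.Int.toStr ((k : Int) + 1)) (m + p)).insert
            ("progressive_step_" ++ PySem.Int.toStr ((k : Int) + 2)) (m + p + ss[k])) := by
        constructor
        · rw [hmem2]
          rintro (h | h | h)
          · exact pkey_ne_drop _ h.symm
          · exact skey_ne_drop _ h.symm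
          · exact hdr h
        · intro j hj
          have hj' : (k : Int) < j := by push_cast at hj; omega
          constructor
          · rw [hmem2]
            rintro (h | h | h)
            · exact skey_ne_pkey _ _ h
            · exact skey_inj j ((k : Int) + 1) (by omega) (by omega) (by push_cast at hj; omega) h
            · exact (hf.2 j hj').1 h
          · rw [hmem2]
            rintro (h | h | h)
            · exact pkey_inj (j + 1) ((k : Int) + 2) (by omega) (by omega) (by push_cast at hj; omega) h
            · exact (skey_ne_pkey _ _ h.symm).elim
            · exact (hf.2 j hj').2 h
      have hk' : (k + 1) + (q :: rs).length = ps.length := by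
        simp only [List.length_cons] at hk ⊢; omega
      have hih := ih (k + 1) (m + p + ss[k]) _ hk' hfresh2
      rw [show ((k + 1 : Nat) : Int) = (k : Int) + 1 by push_cast; ring] at hih
      rw [hdrop]
      have hzne : ((q :: rs).zip (ss.drop (k + 1))).isEmpty = false := by
        have : ss.drop (k + 1) ≠ [] := by
          intro h
          have := congrArg List.length h
          simp only [List.length_drop, List.length_nil] at this
          omega
        cases hd : ss.drop (k + 1) with
        | nil => exact absurd hd this
        | cons a b => simp [List.zip]
      constructor
      · rw [hih.1, hitems2]
        simp only [List.zip_cons_cons, ents, cum, hzne, Bool.false_eq_true, if_false, hget]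
        simp [skey, pkey, List.append_assoc]
      · rw [hih.2]
        simp only [List.zip_cons_cons, ents, cumFin, hzne, Bool.false_eq_true, if_false, hget]

-- B's fold appends the schedule
lemma foldB (ps : List Int) :
    ∀ (tail : List (Int × Int)) (k : Nat) (es : List (String × Int)),
      k + tail.length = ps.length →
      (PySem.List.enumerate tail (k : Int)).foldl
        (fun (es : List (String × Int)) ix =>
          (es ++ [("stabilize_step_" ++ PySem.Int.toStr (ix.1 + 1), ix.2.1)]) ++
            [((if ix.1 == PySem.List.len ps - 1 then "dropout_step"
                else "progressive_step_" ++ PySem.Int.toStr (ix.1 + 2)), ix.2.2)]) es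
        = es ++ ents k tail := by
  intro tail
  induction tail with
  | nil => intro k es hk; simp [PySem.List.enumerate_nil, ents]
  | cons x rest ih =>
    intro k es hk
    cases x with
    | mk p s =>
      rw [PySem.List.enumerate_cons]
      simp only [List.foldl_cons]
      have hcond : ((k : Int) == PySem.List.len ps - 1) = rest.isEmpty := by
        cases rest with
        | nil =>
          have h1 : (k : Int) = (ps.length : Int) - 1 := by
            simp only [List.length_cons, List.length_nil] at hk; omega
          simp [PySem.List.len_eq, h1]
        | cons a b =>
          have h1 : (k : Int) ≠ (ps.length : Int) - 1 := by
            simp only [List.length_cons] at hk; push_cast; omega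
          simp [PySem.List.len_eq, h1]
      rw [hcond, show (k : Int) + 1 = ((k + 1 : Nat) : Int) by push_cast; ring,
        ih (k + 1) _ (by simp only [List.length_cons] at hk ⊢; omega)]
      simp only [ents, skey, pkey]
      push_cast
      simp


-- B's cumulative pass computes the values of the cumulated schedule
lemma foldAcc (l : List (String × Int)) :
    ∀ (vs : List Int) (a : Int),
      l.foldl (fun (st : List Int × Int) e => (st.1 ++ [st.2 + e.2], st.2 + e.2)) (vs, a)
        = (vs ++ (cum a l).map (·.2), cumFin a l) := by
  induction l with
  | nil => intro vs a; simp [cum, cumFin]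
  | cons e rest ih => intro vs a; cases e; simp [cum, cumFin, ih]

lemma cumFin_append (a : Int) (l1 l2 : List (String × Int)) :
    cumFin a (l1 ++ l2) = cumFin (cumFin a l1) l2 := by
  induction l1 generalizing a with
  | nil => simp [cumFin]
  | cons e rest ih => cases e; simp [cumFin, ih]

lemma d0_items (w : Int) :
    (PySem.Dict.ofList [("stabilize_step_0", (0 : Int)), ("progressive_step_1", w)]).items
      = [("stabilize_step_0", (0 : Int)), ("progressive_step_1", w)] := rfl

lemma fresh0 (w : Int) :
    Fresh 0 (PySem.Dict.ofList [("stabilize_step_0", (0 : Int)), ("progressive_step_1", w)]) := by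
  have hkeys : (PySem.Dict.ofList [("stabilize_step_0", (0 : Int)), ("progressive_step_1", w)]).keys
      = ["stabilize_step_0", "progressive_step_1"] := rfl
  have h0 : "stabilize_step_0" = skey 0 := by decide
  have h1 : "progressive_step_1" = pkey 1 := by decide
  constructor
  · rw [hkeys]; decide
  · intro j hj
    rw [hkeys]
    constructor
    · simp only [List.mem_cons, List.not_mem_nil, or_false]
      rintro (h | h)
      · exact skey_inj j 0 (by omega) (by omega) (by omega) (h.trans h0)
      · exact skey_ne_pkey j 1 (h.trans h1)
    · simp only [List.mem_cons, List.not_mem_nil, or_false]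
      rintro (h | h)
      · exact skey_ne_pkey 0 (j + 1) (h.trans h0).symm
      · exact pkey_inj (j + 1) 1 (by omega) (by omega) (by omega) (h.trans h1)

-- ===== VERDICT (by name: the statement is the Claim_ definition above) =====
theorem compute_full_cutoffs_spec : Claim_equal_compute_full_cutoffs := by
  intro w ps ss dr _ hpre
  unfold Pre_compute_full_cutoffs at hpre
  unfold Spec_compute_full_cutoffs compute_full_cutoffs compute_full_cutoffs_alt
  have hA := foldA ps ss hpre ps 0 w
    (PySem.Dict.ofList [("stabilize_step_0", (0 : Int)), ("progressive_step_1", w)])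
    (by simp) (fresh0 w)
  have hB := foldB ps (ps.zip ss) 0
    [("stabilize_step_0", (0 : Int)), ("progressive_step_1", w)]
    (by rw [List.length_zip]; omega)
  simp only [Nat.cast_zero, List.drop_zero] at hA hB
  dsimp only
  rw [hB]
  set L := ents 0 (ps.zip ss) with hL
  set es0 : List (String × Int) := [("stabilize_step_0", (0 : Int)), ("progressive_step_1", w)] with hes0
  rw [foldAcc (es0 ++ L) [] 0]
  simp only [Prod.mk.injEq]
  have hcum0 : cum 0 es0 = es0 := by simp [hes0, cum]
  have hfin0 : cumFin 0 es0 = w := by simp [hes0, cumFin]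
  refine ⟨?_, ?_, ?_⟩
  · simp only [PySem.Dict.keys, hA.1, List.map_append, map_fst_cum]
    simp [hes0, d0_items]
  · simp only [PySem.Dict.values, hA.1, List.map_append, List.nil_append,
      cum_append, hcum0, hfin0]
    simp [hes0, d0_items]
  · rw [hA.2, PySem.List.pyGet?_neg_one, List.nil_append,
      getLast?_map_snd_cum 0 (es0 ++ L) (by simp [hes0]), cumFin_append, hfin0]
    simp
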